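-- pv_equiv track=rewrite | github.com/Jayant296/Jayant-DSA | week27/Graphs4/batches.py | solve
-- ===== SOURCE A (Python) =====
-- from collections import deque
--
-- def solve(A, B, C, D):
--     # Typical connected components problem
--     '''
--     we are going to use the BFS here, as we just need to count the number
--     of groups fulfilling the criteria of company , we traverse through all the nodes
--     and maintain a current sum, if its greater than or equal to the D or not.
--     '''
--     adj_list = {i:[] for i in range(1,A+1)}
--     for i in range(len(C)):
--         adj_list[C[i][0]].append(C[i][1])
--         adj_list[C[i][1]].append(C[i][0])
--     visited = [0 for _ in range(A)]
--     selected_grps = 0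
--
--     for k in range(1,A+1):
--         if visited[k-1]:
--             continue
--         queue = deque()
--         queue.append(k)
--         current_sum = B[k-1]
--         visited[k-1] = 1
--         while queue:
--             node = queue.popleft()
--             for i in adj_list[node]:
--                 if visited[i-1]:
--                     continue
--                 queue.append(i)
--                 visited[i-1] = 1
--                 current_sum += B[i-1]
--         if current_sum >= D:
--             selected_grps += 1
--
--     return selected_grps
-- ===== SOURCE B (Python) =====
-- def solve(A, B, C, D):
--     # Union-find by class relabeling instead of graph traversal: rep[x] is the
--     # representative of x's component; each union relabels the whole second class.
--     rep = {i: i for i in range(1, A + 1)}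
--     members = {i: [i] for i in range(1, A + 1)}
--     for e in C:
--         ru, rv = rep[e[0]], rep[e[1]]
--         if ru != rv:
--             for x in members[rv]:
--                 rep[x] = ru
--             members[ru] += members[rv]
--             del members[rv]
--     sums = {}
--     for x in range(1, A + 1):
--         r = rep[x]
--         sums[r] = sums.get(r, 0) + B[x - 1]
--     count = 0
--     for s in sums.values():
--         if s >= D:
--             count += 1
--     return count
-- ===== Notes on version B (the rewrite author's own statement) =====
-- stated objective: alternative
-- what changed: Replaces BFS flood-fill over an adjacency structure by union-find with relabeling unions: no graph traversal at all, components are built by merging classes edge by edge, then node weights are grouped by final representative and the qualifying groups counted.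
import Mathlib
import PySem

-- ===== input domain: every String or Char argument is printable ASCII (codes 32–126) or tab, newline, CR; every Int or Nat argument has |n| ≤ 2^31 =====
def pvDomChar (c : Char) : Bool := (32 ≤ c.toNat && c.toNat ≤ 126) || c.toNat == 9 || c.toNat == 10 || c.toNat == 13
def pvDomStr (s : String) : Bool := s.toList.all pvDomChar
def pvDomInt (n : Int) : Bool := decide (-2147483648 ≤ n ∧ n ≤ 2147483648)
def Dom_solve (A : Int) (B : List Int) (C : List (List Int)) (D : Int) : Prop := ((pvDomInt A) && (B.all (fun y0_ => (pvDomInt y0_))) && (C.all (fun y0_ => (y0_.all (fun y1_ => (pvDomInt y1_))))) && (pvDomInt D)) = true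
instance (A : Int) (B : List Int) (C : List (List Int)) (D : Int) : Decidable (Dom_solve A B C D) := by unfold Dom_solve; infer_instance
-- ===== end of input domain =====

-- B replaces A's BFS flood-fill by union-find with relabeling unions: no graph
-- traversal at all — classes are merged edge by edge, then node weights are grouped
-- by final representative and the qualifying groups counted. Alternative algorithm,
-- similar cost on these inputs.

-- ===== PORT A =====
-- while queue: BFS loop, fuel-bounded recursion (fuel 2*A+1 always suffices under Pre_, see proofs)
def solveBFS (adj : PySem.Dict Int (List Int)) (B : List Int) : Nat → List Int → List Int → Int → (List Int × Int)
  | 0, vl, _, s => (vl, s)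
  | _+1, vl, [], s => (vl, s)
  | f+1, vl, node :: q, s =>
    let st := (adj.getD node []).foldl (fun (st : List Int × List Int × Int) i =>
        if PySem.List.pyGetD st.1 (i-1) 0 ≠ 0 then st
        else (PySem.List.pySetD st.1 (i-1) 1, st.2.1 ++ [i], st.2.2 + PySem.List.pyGetD B (i-1) 0)) (vl, q, s)
    solveBFS adj B f st.1 st.2.1 st.2.2

def solve (A : Int) (B : List Int) (C : List (List Int)) (D : Int) : Int :=
  -- adj_list = {i: [] for i in range(1, A+1)}
  let adj0 : PySem.Dict Int (List Int) := (PySem.List.pyRange 1 (A+1) 1).foldl (fun d i => d.insert i []) PySem.Dict.empty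
  -- for i in range(len(C)): append both directions (index/key errors are excluded by Pre_; getD/modify are total stand-ins)
  let adj := C.foldl (fun d e =>
      (d.modify (PySem.List.pyGetD e 0 0) [] (fun l => l ++ [PySem.List.pyGetD e 1 0])).modify
        (PySem.List.pyGetD e 1 0) [] (fun l => l ++ [PySem.List.pyGetD e 0 0])) adj0
  -- visited = [0 for _ in range(A)]
  let visited : List Int := (PySem.List.pyRange 0 A 1).map (fun _ => 0)
  let st := (PySem.List.pyRange 1 (A+1) 1).foldl (fun (st : List Int × Int) k =>
      if PySem.List.pyGetD st.1 (k-1) 0 ≠ 0 then st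
      else
        let r := solveBFS adj B (2*A.toNat+1) (PySem.List.pySetD st.1 (k-1) 1) [k] (PySem.List.pyGetD B (k-1) 0)
        (r.1, if r.2 ≥ D then st.2 + 1 else st.2)) (visited, 0)
  st.2

-- ===== PORT B =====
-- rep = {i: i for i in range(1, A+1)}; members = {i: [i] for i in range(1, A+1)}
def repInit (A : Int) : PySem.Dict Int Int :=
  (PySem.List.pyRange 1 (A+1) 1).foldl (fun d i => d.insert i i) PySem.Dict.empty
def memInit (A : Int) : PySem.Dict Int (List Int) :=
  (PySem.List.pyRange 1 (A+1) 1).foldl (fun d i => d.insert i [i]) PySem.Dict.empty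

-- one edge of the union loop (dict lookups that would raise KeyError are excluded by
-- Pre_; getD/modify are total stand-ins for them)
def ufStep (st : PySem.Dict Int Int × PySem.Dict Int (List Int)) (e : List Int) :
    PySem.Dict Int Int × PySem.Dict Int (List Int) :=
  let ru := st.1.getD (PySem.List.pyGetD e 0 0) 0
  let rv := st.1.getD (PySem.List.pyGetD e 1 0) 0
  if ru ≠ rv then
    ((st.2.getD rv []).foldl (fun d x => d.insert x ru) st.1,
     (st.2.modify ru [] (fun l => l ++ st.2.getD rv [])).erase rv)
  else st

-- sums[r] = sums.get(r, 0) + B[x-1] grouped by final representative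
def grpSums (rep : PySem.Dict Int Int) (A : Int) (B : List Int) : PySem.Dict Int Int :=
  (PySem.List.pyRange 1 (A+1) 1).foldl (fun s x =>
      s.insert (rep.getD x 0) (s.getD (rep.getD x 0) 0 + PySem.List.pyGetD B (x-1) 0))
    PySem.Dict.empty

def solve_alt (A : Int) (B : List Int) (C : List (List Int)) (D : Int) : Int :=
  let st := C.foldl ufStep (repInit A, memInit A)
  let sums := grpSums st.1 A B
  sums.values.foldl (fun cnt s => if s ≥ D then cnt + 1 else cnt) 0

-- ===== PRECONDITION & SPEC =====
-- Pre_ excludes exactly the inputs where the Python A raises: an edge row with fewer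
-- than two entries (IndexError), an edge endpoint outside 1..A (KeyError), or B shorter
-- than A (IndexError on B[k-1]).
def Pre_solve (A : Int) (B : List Int) (C : List (List Int)) (D : Int) : Prop :=
  A ≤ (B.length : Int) ∧
  ∀ e ∈ C, 2 ≤ (e.length : Int) ∧
    1 ≤ PySem.List.pyGetD e 0 0 ∧ PySem.List.pyGetD e 0 0 ≤ A ∧
    1 ≤ PySem.List.pyGetD e 1 0 ∧ PySem.List.pyGetD e 1 0 ≤ A
instance (A : Int) (B : List Int) (C : List (List Int)) (D : Int) : Decidable (Pre_solve A B C D) := by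
  unfold Pre_solve; infer_instance

def pvWitness_solve : Int × List Int × List (List Int) × Int := (3, [5, 1, 2], [[1, 2]], 4)

def Spec_solve (A : Int) (B : List Int) (C : List (List Int)) (D : Int) (out : Int) : Prop := out = solve_alt A B C D
instance (A : Int) (B : List Int) (C : List (List Int)) (D : Int) (out : Int) : Decidable (Spec_solve A B C D out) := by unfold Spec_solve; infer_instance

-- ===== CLAIM (what is proved, stated in full; the proofs are below) =====
def Claim_equal_solve : Prop := ∀ (A : Int) (B : List Int) (C : List (List Int)) (D : Int), Dom_solve A B C D → Pre_solve A B C D → Spec_solve A B C D (solve A B C D)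

-- ===== LEMMAS AND PROOFS =====

-- The abstract worklist machine A's BFS is bridged to: visited as a Bool-valued
-- function, a pending list Q, a running sum.
structure ASt where
  V : Int → Bool
  Q : List Int
  s : Int

def ainner (g : Int → List Int) (b : Int → Int) (x : Int) (st : ASt) : ASt :=
  (g x).foldl (fun st i =>
    if st.V i then st
    else ⟨fun y => if y = i then true else st.V y, st.Q ++ [i], st.s + b i⟩) st

def arun (pick : List Int → Int × List Int) (g : Int → List Int) (b : Int → Int) : Nat → ASt → ASt
  | 0, st => st
  | f+1, st =>
    match st.Q with
    | [] => st
    | _ :: _ => arun pick g b f (ainner g b (pick st.Q).1 ⟨st.V, (pick st.Q).2, st.s⟩)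

def pickF (Q : List Int) : Int × List Int := (Q.headD 0, Q.tail)

def PickOK (pick : List Int → Int × List Int) : Prop :=
  ∀ x xs, ((x :: xs : List Int)).Perm ((pick (x :: xs)).1 :: (pick (x :: xs)).2)

-- reachability from the pending set through currently-unvisited nodes
inductive RC (g : Int → List Int) (V : Int → Bool) (Q : List Int) : Int → Prop
  | base (x : Int) : x ∈ Q → RC g V Q x
  | step (x y : Int) : RC g V Q x → y ∈ g x → V y = false → RC g V Q y

def CL (g : Int → List Int) (V : Int → Bool) (Q : List Int) : Prop :=
  ∀ x, V x = true → x ∈ Q ∨ ∀ y ∈ g x, V y = true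

def unvis (nodes : List Int) (V : Int → Bool) : Nat := (nodes.filter (fun x => !V x)).length

def sumNew (nodes : List Int) (b : Int → Int) (V V' : Int → Bool) : Int :=
  (nodes.map (fun x => if V' x && !V x then b x else 0)).sum

-- adjacency as a pure function of the edge list (what A's built dict holds per key)
def gAdj (C : List (List Int)) (x : Int) : List Int :=
  C.flatMap (fun e =>
    (if PySem.List.pyGetD e 0 0 = x then [PySem.List.pyGetD e 1 0] else []) ++
    (if PySem.List.pyGetD e 1 0 = x then [PySem.List.pyGetD e 0 0] else []))

def aouter (pick : List Int → Int × List Int) (g : Int → List Int) (b : Int → Int)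
    (fuel : Nat) (Dv : Int) (ks : List Int) (V0 : Int → Bool) (c0 : Int) : (Int → Bool) × Int :=
  ks.foldl (fun (st : (Int → Bool) × Int) k =>
    if st.1 k then st
    else
      let r := arun pick g b fuel ⟨fun y => if y = k then true else st.1 y, [k], b k⟩
      (r.V, if r.s ≥ Dv then st.2 + 1 else st.2)) (V0, c0)

-- one step of edge-connectivity, and its reflexive-transitive closure
def edgeRel (C : List (List Int)) (x y : Int) : Prop :=
  ∃ e ∈ C, (PySem.List.pyGetD e 0 0 = x ∧ PySem.List.pyGetD e 1 0 = y) ∨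
           (PySem.List.pyGetD e 1 0 = x ∧ PySem.List.pyGetD e 0 0 = y)

def ConnL (C : List (List Int)) : Int → Int → Prop := Relation.ReflTransGen (edgeRel C)

-- weight of a node, class sum of a node's class under a representative map c
def clsSum (c : Int → Int) (b : Int → Int) (N : List Int) (k : Int) : Int :=
  ((N.filter (fun x => c x == c k)).map b).sum

-- the nodes of L whose c-value was not seen before (first occurrence order)
def firstsV (c : Int → Int) : List Int → List Int → List Int
  | _, [] => []
  | seen, k :: t => if c k ∈ seen then firstsV c seen t else k :: firstsV c (seen ++ [c k]) t

-- union-find invariant: rep values lie in 1..A, rep-equality is edge-connectivity of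
-- the processed prefix, and members lists the class of each representative
def UFInv (A : Int) (p : List (List Int)) (st : PySem.Dict Int Int × PySem.Dict Int (List Int)) : Prop :=
  (∀ x, 1 ≤ x → x ≤ A → 1 ≤ st.1.getD x 0 ∧ st.1.getD x 0 ≤ A) ∧
  (∀ x y, 1 ≤ x → x ≤ A → 1 ≤ y → y ≤ A → (st.1.getD x 0 = st.1.getD y 0 ↔ ConnL p x y)) ∧
  (∀ r x, x ∈ st.2.getD r [] ↔ (1 ≤ x ∧ x ≤ A ∧ st.1.getD x 0 = r))

theorem sumNew_refl (nodes : List Int) (b : Int → Int) (V : Int → Bool) : sumNew nodes b V V = 0 := by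
  unfold sumNew
  apply List.sum_eq_zero
  intro x hx
  simp only [List.mem_map] at hx
  obtain ⟨y, _, hy⟩ := hx
  simp at hy
  omega

theorem sumNew_split (nodes : List Int) (b : Int → Int) (V V1 V2 : Int → Bool)
    (h1 : ∀ x, V x = true → V1 x = true) (h2 : ∀ x, V1 x = true → V2 x = true) :
    sumNew nodes b V V2 = sumNew nodes b V V1 + sumNew nodes b V1 V2 := by
  induction nodes with
  | nil => rfl
  | cons a t ih =>
    simp only [sumNew, List.map, List.sum_cons] at ih ⊢
    have ha : (if V2 a && !V a then b a else 0) = (if V1 a && !V a then b a else 0) + (if V2 a && !V1 a then b a else 0) := by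
      by_cases hva : V a = true
      · have hv1 : V1 a = true := h1 a hva
        have hv2 : V2 a = true := h2 a hv1
        simp [hva, hv1, hv2]
      · simp only [Bool.not_eq_true] at hva
        by_cases hv1 : V1 a = true
        · have hv2 := h2 a hv1
          simp [hva, hv1, hv2]
        · simp only [Bool.not_eq_true] at hv1
          cases h2a : V2 a <;> simp [hva, hv1, h2a]
    rw [ha, ih]; ring

theorem sumNew_single (nodes : List Int) (b : Int → Int) (V : Int → Bool) (i : Int)
    (hi : i ∈ nodes) (hnd : nodes.Nodup) (hV : V i = false) :
    sumNew nodes b V (fun y => if y = i then true else V y) = b i := by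
  induction nodes with
  | nil => simp at hi
  | cons a t ih =>
    rcases List.nodup_cons.mp hnd with ⟨hna, hnt⟩
    simp only [sumNew, List.map, List.sum_cons] at ih ⊢
    rcases List.mem_cons.mp hi with h | h
    · subst h
      have hz : (List.map (fun x => if (if x = i then true else V x) && !V x then b x else 0) t).sum = 0 := by
        apply List.sum_eq_zero
        intro y hy
        simp only [List.mem_map] at hy
        obtain ⟨x, hx, rfl⟩ := hy
        have hne : x ≠ i := fun he => hna (he ▸ hx)
        cases hv : V x <;> simp [hne, hv]
      simp only [List.map_cons, List.sum_cons]
      rw [hz]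
      simp [hV]
    · have hne : a ≠ i := fun he => hna (he ▸ h)
      have hz : (if (if a = i then true else V a) && !V a then b a else 0) = 0 := by
        cases hv : V a <;> simp [hne, hv]
      rw [hz, ih h hnt, zero_add]

theorem unvis_upd (nodes : List Int) (V : Int → Bool) (i : Int)
    (hi : i ∈ nodes) (hnd : nodes.Nodup) (hV : V i = false) :
    unvis nodes (fun y => if y = i then true else V y) + 1 = unvis nodes V := by
  induction nodes with
  | nil => simp at hi
  | cons a t ih =>
    rcases List.nodup_cons.mp hnd with ⟨hna, hnt⟩
    simp only [unvis] at ih ⊢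
    rcases List.mem_cons.mp hi with h | h
    · subst h
      have hfil : List.filter (fun x => !(if x = i then true else V x)) t = List.filter (fun x => !V x) t := by
        apply List.filter_congr
        intro x hx
        have hne : x ≠ i := fun he => hna (he ▸ hx)
        simp [hne]
      rw [show List.filter (fun x => !(if x = i then true else V x)) (i :: t) = List.filter (fun x => !(if x = i then true else V x)) t by rw [List.filter_cons]; simp]
      rw [show List.filter (fun x => !V x) (i :: t) = i :: List.filter (fun x => !V x) t by rw [List.filter_cons]; simp [hV]]
      rw [hfil]
      simp
    · have hne : a ≠ i := fun he => hna (he ▸ h)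
      have hfa : (!(if a = i then true else V a)) = (!V a) := by simp [hne]
      rw [List.filter_cons, List.filter_cons, hfa]
      have ht := ih h hnt
      simp at ht
      cases hv : V a <;> simp [hv] at ht ⊢ <;> omega

theorem ainner_char (g : Int → List Int) (b : Int → Int) (nodes : List Int) (hnd : nodes.Nodup)
    (ns : List Int) (hns : ∀ y ∈ ns, y ∈ nodes) :
    ∀ (V : Int → Bool) (Q : List Int) (s : Int),
    let r := ns.foldl (fun st i =>
      if st.V i then st
      else ⟨fun y => if y = i then true else st.V y, st.Q ++ [i], st.s + b i⟩) (⟨V, Q, s⟩ : ASt)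
    (∀ x, r.V x = (V x || decide (x ∈ ns))) ∧
    (∀ x, x ∈ r.Q ↔ x ∈ Q ∨ (x ∈ ns ∧ V x = false)) ∧
    r.s = s + sumNew nodes b V r.V ∧
    r.Q.length + 2 * unvis nodes r.V ≤ Q.length + 2 * unvis nodes V := by
  induction ns with
  | nil =>
    intro V Q s r
    refine ⟨by simp [r], by simp [r], ?_, by simp [r]⟩
    have : r.V = V := rfl
    rw [this, sumNew_refl]
    simp [r]
  | cons i ns' ih =>
    intro V Q s r
    have hins : i ∈ nodes := hns i (List.mem_cons_self ..)
    have hns' : ∀ y ∈ ns', y ∈ nodes := fun y hy => hns y (List.mem_cons_of_mem _ hy)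
    by_cases hVi : V i = true
    · have hr : r = ns'.foldl (fun st i =>
        if st.V i then st
        else ⟨fun y => if y = i then true else st.V y, st.Q ++ [i], st.s + b i⟩) (⟨V, Q, s⟩ : ASt) := by
        simp only [r, List.foldl_cons, hVi, if_true]
      obtain ⟨c1, c2, c3, c4⟩ := ih hns' V Q s
      refine ⟨?_, ?_, ?_, ?_⟩
      · intro x
        rw [hr, c1 x]
        by_cases hx : x = i
        · subst hx; simp [hVi]
        · simp [hx]
      · intro x
        rw [hr, c2 x]
        constructor
        · rintro (h | ⟨h1, h2⟩)
          · exact Or.inl h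
          · exact Or.inr ⟨List.mem_cons_of_mem _ h1, h2⟩
        · rintro (h | ⟨h1, h2⟩)
          · exact Or.inl h
          · rcases List.mem_cons.mp h1 with rfl | h1
            · exact absurd hVi (by simp [h2])
            · exact Or.inr ⟨h1, h2⟩
      · rw [hr]; exact c3
      · rw [hr]; exact c4
    · simp only [Bool.not_eq_true] at hVi
      have hr : r = ns'.foldl (fun st i =>
        if st.V i then st
        else ⟨fun y => if y = i then true else st.V y, st.Q ++ [i], st.s + b i⟩)
          (⟨fun y => if y = i then true else V y, Q ++ [i], s + b i⟩ : ASt) := by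
        simp only [r, List.foldl_cons, hVi]
        rfl
      obtain ⟨c1, c2, c3, c4⟩ := ih hns' (fun y => if y = i then true else V y) (Q ++ [i]) (s + b i)
      set r' : ASt := ns'.foldl (fun st i =>
        if st.V i then st
        else ⟨fun y => if y = i then true else st.V y, st.Q ++ [i], st.s + b i⟩)
          (⟨fun y => if y = i then true else V y, Q ++ [i], s + b i⟩ : ASt) with hr'
      have hmono1 : ∀ x, V x = true → (fun y => if y = i then true else V y) x = true := by
        intro x hx; by_cases h : x = i <;> simp [h, hx]
      have hmono2 : ∀ x, (fun y => if y = i then true else V y) x = true → r'.V x = true := by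
        intro x hx
        rw [c1 x]
        simp only at hx
        simp [hx]
      refine ⟨?_, ?_, ?_, ?_⟩
      · intro x
        rw [hr, c1 x]
        by_cases hx : x = i
        · subst hx; simp
        · simp [hx]
      · intro x
        rw [hr, c2 x]
        constructor
        · rintro (h | ⟨h1, h2⟩)
          · rcases List.mem_append.mp h with h | h
            · exact Or.inl h
            · simp only [List.mem_singleton] at h
              exact Or.inr ⟨by simp [h], by rw [h]; exact hVi⟩
          · by_cases hx : x = i
            · exact Or.inr ⟨by simp [hx], by rw [hx]; exact hVi⟩
            · simp only [hx, if_false] at h2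
              exact Or.inr ⟨List.mem_cons_of_mem _ h1, h2⟩
        · rintro (h | ⟨h1, h2⟩)
          · exact Or.inl (List.mem_append.mpr (Or.inl h))
          · by_cases hx : x = i
            · exact Or.inl (List.mem_append.mpr (Or.inr (by simp [hx])))
            · rcases List.mem_cons.mp h1 with h1 | h1
              · exact absurd h1 hx
              · exact Or.inr ⟨h1, by simp [hx, h2]⟩
      · rw [hr, c3]
        have hsplit := sumNew_split nodes b V (fun y => if y = i then true else V y) r'.V hmono1 hmono2
        rw [hsplit, sumNew_single nodes b V i hins hnd hVi]
        ring
      · rw [hr]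
        have hu := unvis_upd nodes V i hins hnd hVi
        simp only [List.length_append, List.length_cons, List.length_nil] at c4 ⊢
        omega

theorem RC_nil (g : Int → List Int) (V : Int → Bool) (x : Int) : ¬ RC g V [] x := by
  intro h
  induction h with
  | base z hz => simp at hz
  | step z y hrz hyg hVy ih => exact ih

theorem RC_step_iff (g : Int → List Int) (V V1 : Int → Bool) (Q Q' Q1 : List Int) (q : Int)
    (hq : q ∈ Q) (hQV : ∀ p ∈ Q, V p = true) (hCL : CL g V Q)
    (hV1 : ∀ x, V1 x = (V x || decide (x ∈ g q)))
    (hQ1 : ∀ x, x ∈ Q1 ↔ x ∈ Q' ∨ (x ∈ g q ∧ V x = false))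
    (hQmem : ∀ x, x ∈ Q → x = q ∨ x ∈ Q')
    (hQ'sub : ∀ x ∈ Q', x ∈ Q) :
    ∀ x, (V x = true ∨ RC g V Q x) ↔ (V1 x = true ∨ RC g V1 Q1 x) := by
  intro x
  constructor
  · rintro (hV | hrc)
    · left; rw [hV1 x, hV]; rfl
    · induction hrc with
      | base z hz =>
        rcases hQmem z hz with rfl | hz'
        · left; rw [hV1 z]; simp [hQV z hz]
        · right; exact RC.base z ((hQ1 z).mpr (Or.inl hz'))
      | step z y hrz hyg hVy ihz =>
        by_cases hV1y : V1 y = true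
        · exact Or.inl hV1y
        · right
          rcases ihz with h1 | h1
          · rw [hV1 z] at h1
            simp only [Bool.or_eq_true, decide_eq_true_eq] at h1
            by_cases hVz : V z = true
            · rcases hCL z hVz with hzQ | hnb
              · rcases hQmem z hzQ with rfl | hz'
                · exact RC.base y ((hQ1 y).mpr (Or.inr ⟨hyg, hVy⟩))
                · exact RC.step z y (RC.base z ((hQ1 z).mpr (Or.inl hz'))) hyg
                    (Bool.eq_false_iff.mpr hV1y)
              · exact absurd (hnb y hyg) (by simp [hVy])
            · simp only [Bool.not_eq_true] at hVz
              have hz1 : z ∈ Q1 := (hQ1 z).mpr (Or.inr ⟨h1.resolve_left (by simp [hVz]), hVz⟩)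
              exact RC.step z y (RC.base z hz1) hyg (Bool.eq_false_iff.mpr hV1y)
          · exact RC.step z y h1 hyg (Bool.eq_false_iff.mpr hV1y)
  · rintro (hV1x | hrc)
    · rw [hV1 x] at hV1x
      simp only [Bool.or_eq_true, decide_eq_true_eq] at hV1x
      by_cases hVx : V x = true
      · exact Or.inl hVx
      · simp only [Bool.not_eq_true] at hVx
        exact Or.inr (RC.step q x (RC.base q hq) (hV1x.resolve_left (by simp [hVx])) hVx)
    · induction hrc with
      | base z hz =>
        rcases (hQ1 z).mp hz with hz' | ⟨hg', hVf⟩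
        · exact Or.inr (RC.base z (hQ'sub z hz'))
        · exact Or.inr (RC.step q z (RC.base q hq) hg' hVf)
      | step z y hrz hyg hV1y ihz =>
        have hVy : V y = false := by
          have := (hV1 y) ▸ hV1y
          simp only [Bool.or_eq_false_iff] at this
          exact this.1
        rcases ihz with h1 | h1
        · rcases hCL z h1 with hzQ | hnb
          · exact Or.inr (RC.step z y (RC.base z hzQ) hyg hVy)
          · exact absurd (hnb y hyg) (by simp [hVy])
        · exact Or.inr (RC.step z y h1 hyg hVy)

theorem arun_nil (pick : List Int → Int × List Int) (g : Int → List Int) (b : Int → Int)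
    (f : Nat) (st : ASt) (h : st.Q = []) : arun pick g b f st = st := by
  cases f with
  | zero => rfl
  | succ f =>
    cases st with
    | mk V Q s =>
      simp only at h
      subst h
      rfl

theorem arun_cons (pick : List Int → Int × List Int) (g : Int → List Int) (b : Int → Int)
    (f : Nat) (st : ASt) (z : Int) (zs : List Int) (h : st.Q = z :: zs) :
    arun pick g b (f+1) st = arun pick g b f (ainner g b (pick st.Q).1 ⟨st.V, (pick st.Q).2, st.s⟩) := by
  cases st with
  | mk V Q s =>
    simp only at h
    subst h
    rfl

theorem arun_char (nodes : List Int) (hnd : nodes.Nodup) (g : Int → List Int) (b : Int → Int)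
    (hg : ∀ x y, y ∈ g x → y ∈ nodes) (pick : List Int → Int × List Int) (hp : PickOK pick) :
    ∀ (f : Nat) (st : ASt), (∀ p ∈ st.Q, st.V p = true) → (∀ p ∈ st.Q, p ∈ nodes) →
      CL g st.V st.Q → st.Q.length + 2 * unvis nodes st.V ≤ f →
    (arun pick g b f st).Q = [] ∧
    (∀ x, st.V x = true → (arun pick g b f st).V x = true) ∧
    (∀ x, (arun pick g b f st).V x = true ↔ (st.V x = true ∨ RC g st.V st.Q x)) ∧
    (arun pick g b f st).s = st.s + sumNew nodes b st.V (arun pick g b f st).V ∧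
    CL g (arun pick g b f st).V [] := by
  intro f
  induction f with
  | zero =>
    intro st hQV hQn hCL hmeas
    have hQe : st.Q = [] := List.eq_nil_of_length_eq_zero (by omega)
    rw [arun_nil pick g b 0 st hQe]
    refine ⟨hQe, fun x hx => hx, ?_, by rw [sumNew_refl]; ring, ?_⟩
    · intro x
      constructor
      · exact Or.inl
      · rintro (h | h)
        · exact h
        · rw [hQe] at h
          exact absurd h (RC_nil g st.V x)
    · intro x hx
      rcases hCL x hx with h | h
      · rw [hQe] at h
        exact Or.inl h
      · exact Or.inr h
  | succ f ih =>
    intro st hQV hQn hCL hmeas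
    cases hQ : st.Q with
    | nil =>
      rw [arun_nil pick g b (f+1) st hQ]
      refine ⟨hQ, fun x hx => hx, ?_, by rw [sumNew_refl]; ring, ?_⟩
      · intro x
        constructor
        · exact Or.inl
        · rintro (h | h)
          · exact h
          · exact absurd h (RC_nil g st.V x)
      · intro x hx
        rcases hCL x hx with h | h
        · rw [hQ] at h
          exact absurd h (by simp)
        · exact Or.inr h
    | cons z zs =>
      rw [← hQ]
      have hperm : st.Q.Perm ((pick st.Q).1 :: (pick st.Q).2) := by rw [hQ]; exact hp z zs
      set q := (pick st.Q).1 with hqdef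
      set Q' := (pick st.Q).2 with hQ'def
      have hq : q ∈ st.Q := hperm.mem_iff.mpr (List.mem_cons_self ..)
      have hQ'len : Q'.length + 1 = st.Q.length := by
        have := hperm.length_eq
        simp at this
        omega
      have hQ'sub : ∀ x ∈ Q', x ∈ st.Q := fun x hx => hperm.mem_iff.mpr (List.mem_cons_of_mem _ hx)
      have hQmem : ∀ x ∈ st.Q, x = q ∨ x ∈ Q' := by
        intro x hx
        rcases List.mem_cons.mp (hperm.mem_iff.mp hx) with h | h
        · exact Or.inl h
        · exact Or.inr h
      have hchar := ainner_char g b nodes hnd (g q) (hg q) st.V Q' st.s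
      obtain ⟨c1, c2, c3, c4⟩ := hchar
      set st1 : ASt := (g q).foldl (fun st i =>
        if st.V i then st
        else ⟨fun y => if y = i then true else st.V y, st.Q ++ [i], st.s + b i⟩)
          (⟨st.V, Q', st.s⟩ : ASt) with hst1
      have hQV1 : ∀ p ∈ st1.Q, st1.V p = true := by
        intro p hp1
        rw [c1 p]
        rcases (c2 p).mp hp1 with h | ⟨h, _⟩
        · simp [hQV p (hQ'sub p h)]
        · simp [h]
      have hQn1 : ∀ p ∈ st1.Q, p ∈ nodes := by
        intro p hp1
        rcases (c2 p).mp hp1 with h | ⟨h, _⟩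
        · exact hQn p (hQ'sub p h)
        · exact hg q p h
      have hCL1 : CL g st1.V st1.Q := by
        intro x hx
        rw [c1 x] at hx
        simp only [Bool.or_eq_true, decide_eq_true_eq] at hx
        by_cases hVx : st.V x = true
        · rcases hCL x hVx with hxQ | hnb
          · rcases hQmem x hxQ with rfl | hx'
            · right
              intro y hy
              rw [c1 y]
              simp [hy]
            · exact Or.inl ((c2 x).mpr (Or.inl hx'))
          · right
            intro y hy
            rw [c1 y]
            simp [hnb y hy]
        · simp only [Bool.not_eq_true] at hVx
          exact Or.inl ((c2 x).mpr (Or.inr ⟨hx.resolve_left (by simp [hVx]), hVx⟩))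
      have hmeas1 : st1.Q.length + 2 * unvis nodes st1.V ≤ f := by
        have hlen : st.Q.length = zs.length + 1 := by rw [hQ]; simp
        omega
      obtain ⟨d1, d2, d3, d4, d5⟩ := ih st1 hQV1 hQn1 hCL1 hmeas1
      have hrw : arun pick g b (f+1) st = arun pick g b f st1 := by
        rw [arun_cons pick g b f st z zs hQ]
        rfl
      rw [hrw]
      have hiff := RC_step_iff g st.V st1.V st.Q Q' st1.Q q hq hQV hCL c1 c2 hQmem hQ'sub
      refine ⟨d1, ?_, ?_, ?_, d5⟩
      · intro x hx
        apply d2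
        rw [c1 x, hx]
        rfl
      · intro x
        rw [d3 x, ← hiff x]
      · rw [d4, c3]
        have hmono1 : ∀ x, st.V x = true → st1.V x = true := by
          intro x hx
          rw [c1 x, hx]
          rfl
        have hsplit := sumNew_split nodes b st.V st1.V (arun pick g b f st1).V hmono1 d2
        rw [hsplit]
        ring

theorem pickF_ok : PickOK pickF := by
  intro x xs
  exact List.Perm.refl _

theorem gAdj_cons (e : List Int) (C : List (List Int)) (x : Int) :
    gAdj (e :: C) x =
      ((if PySem.List.pyGetD e 0 0 = x then [PySem.List.pyGetD e 1 0] else []) ++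
       (if PySem.List.pyGetD e 1 0 = x then [PySem.List.pyGetD e 0 0] else [])) ++ gAdj C x := by
  simp [gAdj]

theorem getD_double_modify (d : PySem.Dict Int (List Int)) (u v x : Int) :
    ((d.modify u [] (fun l => l ++ [v])).modify v [] (fun l => l ++ [u])).getD x []
      = d.getD x [] ++ ((if u = x then [v] else []) ++ (if v = x then [u] else [])) := by
  simp only [PySem.Dict.getD_modify]
  by_cases h1 : x = v <;> by_cases h2 : x = u <;> simp_all [eq_comm]

theorem adjA_getD (C : List (List Int)) (x : Int) :
    ∀ d : PySem.Dict Int (List Int),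
    (C.foldl (fun d e =>
      (d.modify (PySem.List.pyGetD e 0 0) [] (fun l => l ++ [PySem.List.pyGetD e 1 0])).modify
        (PySem.List.pyGetD e 1 0) [] (fun l => l ++ [PySem.List.pyGetD e 0 0])) d).getD x []
      = d.getD x [] ++ gAdj C x := by
  induction C with
  | nil => intro d; simp [gAdj]
  | cons e C ih =>
    intro d
    rw [List.foldl_cons, ih, gAdj_cons, getD_double_modify]
    simp [List.append_assoc]

theorem adj0_getD (A : Int) (x : Int) :
    ((PySem.List.pyRange 1 (A+1) 1).foldl (fun d i => d.insert i []) PySem.Dict.empty).getD x ([] : List Int) = [] := by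
  have key : ∀ (l : List Int) (d : PySem.Dict Int (List Int)), (∀ k, d.getD k ([] : List Int) = []) →
      (l.foldl (fun d i => d.insert i []) d).getD x ([] : List Int) = [] := by
    intro l
    induction l with
    | nil => intro d hd; exact hd x
    | cons i l ih =>
      intro d hd
      rw [List.foldl_cons]
      apply ih
      intro k
      by_cases hk : k = i
      · subst hk; rw [PySem.Dict.getD_insert_self]
      · rw [PySem.Dict.getD_insert_of_ne _ _ _ hk]
        exact hd k
  exact key _ _ (fun k => PySem.Dict.getD_empty k [])

theorem mem_gAdj_range (A : Int) (B : List Int) (C : List (List Int)) (D : Int)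
    (hpre : Pre_solve A B C D) (x y : Int) (hy : y ∈ gAdj C x) : 1 ≤ y ∧ y ≤ A := by
  simp only [gAdj, List.mem_flatMap] at hy
  obtain ⟨e, he, hmem⟩ := hy
  obtain ⟨-, h1, h2, h3, h4⟩ := hpre.2 e he
  rcases List.mem_append.mp hmem with h | h <;> split_ifs at h <;> simp at h <;>
    subst h <;> exact ⟨by assumption, by assumption⟩

-- visited-array abstraction, clamped to the node range 1..A (out-of-range reads of the
-- Python list would wrap around; the machines never perform them)
def VA (A : Int) (vl : List Int) : Int → Bool :=
  fun x => decide (1 ≤ x) && decide (x ≤ A) && decide (PySem.List.pyGetD vl (x-1) 0 ≠ 0)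

theorem VA_zero (A : Int) : VA A ((PySem.List.pyRange 0 A 1).map (fun _ => 0)) = fun _ => false := by
  funext x
  simp only [VA, Bool.and_eq_false_iff]
  by_cases h1 : 1 ≤ x
  · by_cases h2 : x ≤ A
    · rw [PySem.List.pyGetD_of_nonneg _ _ (by omega)]
      have hz : ((PySem.List.pyRange 0 A 1).map (fun _ => (0:Int))).getD (x-1).toNat 0 = 0 := by
        rw [List.getD_eq_getElem?_getD, List.getElem?_map]
        cases (PySem.List.pyRange 0 A 1)[(x-1).toNat]? <;> rfl
      simp [hz]
    · simp [h2]
  · simp [h1]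

theorem VA_set (A : Int) (vl : List Int) (i : Int) (h1 : 1 ≤ i) (h2 : i ≤ A)
    (hlen : (vl.length : Int) = A) :
    VA A (PySem.List.pySetD vl (i-1) 1) = fun y => if y = i then true else VA A vl y := by
  funext y
  by_cases hy : y = i
  · subst hy
    have hn : ((y-1).toNat : Int) = y - 1 := by omega
    have hlt : (y-1).toNat < vl.length := by omega
    simp only [VA, if_pos rfl]
    rw [← hn, PySem.List.pyGetD_pySetD_natCast vl _ _ _ _ hlt]
    simp [h1, h2]
  · rw [if_neg hy]
    by_cases hr1 : 1 ≤ y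
    · by_cases hr2 : y ≤ A
      · have hn : ((i-1).toNat : Int) = i - 1 := by omega
        have hm : ((y-1).toNat : Int) = y - 1 := by omega
        have hlt : (i-1).toNat < vl.length := by omega
        have hne : (y-1).toNat ≠ (i-1).toNat := by omega
        simp only [VA]
        rw [← hn, ← hm, PySem.List.pyGetD_pySetD_natCast vl _ _ _ _ hlt, if_neg hne, hm]
      · simp [VA, hr2]
    · simp [VA, hr1]

theorem innerA_bridge (A : Int) (B : List Int) (ns : List Int) (hns : ∀ y ∈ ns, 1 ≤ y ∧ y ≤ A) :
    ∀ (vl : List Int) (q : List Int) (s : Int), (vl.length : Int) = A →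
    ((ns.foldl (fun (st : List Int × List Int × Int) i =>
        if PySem.List.pyGetD st.1 (i-1) 0 ≠ 0 then st
        else (PySem.List.pySetD st.1 (i-1) 1, st.2.1 ++ [i], st.2.2 + PySem.List.pyGetD B (i-1) 0)) (vl, q, s)).1.length : Int) = A ∧
    VA A (ns.foldl (fun (st : List Int × List Int × Int) i =>
        if PySem.List.pyGetD st.1 (i-1) 0 ≠ 0 then st
        else (PySem.List.pySetD st.1 (i-1) 1, st.2.1 ++ [i], st.2.2 + PySem.List.pyGetD B (i-1) 0)) (vl, q, s)).1
      = (ns.foldl (fun st i =>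
        if st.V i then st
        else ⟨fun y => if y = i then true else st.V y, st.Q ++ [i], st.s + (fun x => PySem.List.pyGetD B (x-1) 0) i⟩) (⟨VA A vl, q, s⟩ : ASt)).V ∧
    (ns.foldl (fun (st : List Int × List Int × Int) i =>
        if PySem.List.pyGetD st.1 (i-1) 0 ≠ 0 then st
        else (PySem.List.pySetD st.1 (i-1) 1, st.2.1 ++ [i], st.2.2 + PySem.List.pyGetD B (i-1) 0)) (vl, q, s)).2.1
      = (ns.foldl (fun st i =>
        if st.V i then st
        else ⟨fun y => if y = i then true else st.V y, st.Q ++ [i], st.s + (fun x => PySem.List.pyGetD B (x-1) 0) i⟩) (⟨VA A vl, q, s⟩ : ASt)).Q ∧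
    (ns.foldl (fun (st : List Int × List Int × Int) i =>
        if PySem.List.pyGetD st.1 (i-1) 0 ≠ 0 then st
        else (PySem.List.pySetD st.1 (i-1) 1, st.2.1 ++ [i], st.2.2 + PySem.List.pyGetD B (i-1) 0)) (vl, q, s)).2.2
      = (ns.foldl (fun st i =>
        if st.V i then st
        else ⟨fun y => if y = i then true else st.V y, st.Q ++ [i], st.s + (fun x => PySem.List.pyGetD B (x-1) 0) i⟩) (⟨VA A vl, q, s⟩ : ASt)).s := by
  induction ns with
  | nil => intro vl q s hlen; exact ⟨hlen, rfl, rfl, rfl⟩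
  | cons i ns' ih =>
    intro vl q s hlen
    have hi := hns i (List.mem_cons_self ..)
    have hns' : ∀ y ∈ ns', 1 ≤ y ∧ y ≤ A := fun y hy => hns y (List.mem_cons_of_mem _ hy)
    have hcond : VA A vl i = decide (PySem.List.pyGetD vl (i-1) 0 ≠ 0) := by
      simp [VA, hi.1, hi.2]
    by_cases hv : PySem.List.pyGetD vl (i-1) 0 ≠ 0
    · have hc : VA A vl i = true := by rw [hcond]; simp [hv]
      simp only [List.foldl_cons, if_pos hv, hc, if_true]
      exact ih hns' vl q s hlen
    · have hc : VA A vl i = false := by rw [hcond]; simp [hv]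
      simp only [List.foldl_cons, if_neg hv, hc, Bool.false_eq_true, if_false]
      have hlen' : ((PySem.List.pySetD vl (i-1) 1).length : Int) = A := by
        rw [PySem.List.length_pySetD]; exact hlen
      have hVA := VA_set A vl i hi.1 hi.2 hlen
      have := ih hns' (PySem.List.pySetD vl (i-1) 1) (q ++ [i]) (s + PySem.List.pyGetD B (i-1) 0) hlen'
      rw [hVA] at this
      exact this

theorem bfsA_bridge (A : Int) (B : List Int) (C : List (List Int))
    (adj : PySem.Dict Int (List Int)) (hadj : ∀ x, adj.getD x [] = gAdj C x)
    (hrange : ∀ x y, y ∈ gAdj C x → 1 ≤ y ∧ y ≤ A) :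
    ∀ (f : Nat) (vl q : List Int) (s : Int), (vl.length : Int) = A →
    ((solveBFS adj B f vl q s).1.length : Int) = A ∧
    VA A (solveBFS adj B f vl q s).1
      = (arun pickF (gAdj C) (fun x => PySem.List.pyGetD B (x-1) 0) f ⟨VA A vl, q, s⟩).V ∧
    (solveBFS adj B f vl q s).2
      = (arun pickF (gAdj C) (fun x => PySem.List.pyGetD B (x-1) 0) f ⟨VA A vl, q, s⟩).s := by
  intro f
  induction f with
  | zero => intro vl q s hlen; exact ⟨hlen, rfl, rfl⟩
  | succ f ih =>
    intro vl q s hlen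
    cases q with
    | nil => exact ⟨hlen, rfl, rfl⟩
    | cons node q' =>
      have hstep : arun pickF (gAdj C) (fun x => PySem.List.pyGetD B (x-1) 0) (f+1) ⟨VA A vl, node :: q', s⟩
          = arun pickF (gAdj C) (fun x => PySem.List.pyGetD B (x-1) 0) f
              (ainner (gAdj C) (fun x => PySem.List.pyGetD B (x-1) 0) node ⟨VA A vl, q', s⟩) := rfl
      have hbfs : solveBFS adj B (f+1) vl (node :: q') s
          = solveBFS adj B f
              ((adj.getD node []).foldl (fun (st : List Int × List Int × Int) i =>
                if PySem.List.pyGetD st.1 (i-1) 0 ≠ 0 then st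
                else (PySem.List.pySetD st.1 (i-1) 1, st.2.1 ++ [i], st.2.2 + PySem.List.pyGetD B (i-1) 0)) (vl, q', s)).1
              ((adj.getD node []).foldl (fun (st : List Int × List Int × Int) i =>
                if PySem.List.pyGetD st.1 (i-1) 0 ≠ 0 then st
                else (PySem.List.pySetD st.1 (i-1) 1, st.2.1 ++ [i], st.2.2 + PySem.List.pyGetD B (i-1) 0)) (vl, q', s)).2.1
              ((adj.getD node []).foldl (fun (st : List Int × List Int × Int) i =>
                if PySem.List.pyGetD st.1 (i-1) 0 ≠ 0 then st
                else (PySem.List.pySetD st.1 (i-1) 1, st.2.1 ++ [i], st.2.2 + PySem.List.pyGetD B (i-1) 0)) (vl, q', s)).2.2 := rfl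
      rw [hbfs, hstep]
      obtain ⟨i1, i2, i3, i4⟩ := innerA_bridge A B (adj.getD node []) (by rw [hadj]; exact hrange node) vl q' s hlen
      have hai : ainner (gAdj C) (fun x => PySem.List.pyGetD B (x-1) 0) node ⟨VA A vl, q', s⟩
          = ((adj.getD node []).foldl (fun st i =>
              if st.V i then st
              else ⟨fun y => if y = i then true else st.V y, st.Q ++ [i], st.s + (fun x => PySem.List.pyGetD B (x-1) 0) i⟩) (⟨VA A vl, q', s⟩ : ASt)) := by
        rw [ainner, hadj]
      rw [hai]
      set rc := (adj.getD node []).foldl (fun (st : List Int × List Int × Int) i =>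
                if PySem.List.pyGetD st.1 (i-1) 0 ≠ 0 then st
                else (PySem.List.pySetD st.1 (i-1) 1, st.2.1 ++ [i], st.2.2 + PySem.List.pyGetD B (i-1) 0)) (vl, q', s) with hrc
      set ra := (adj.getD node []).foldl (fun st i =>
              if st.V i then st
              else ⟨fun y => if y = i then true else st.V y, st.Q ++ [i], st.s + (fun x => PySem.List.pyGetD B (x-1) 0) i⟩) (⟨VA A vl, q', s⟩ : ASt) with hra
      have key : (⟨VA A rc.1, rc.2.1, rc.2.2⟩ : ASt) = ra := by rw [i2, i3, i4]
      have := ih rc.1 rc.2.1 rc.2.2 i1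
      rw [key] at this
      exact this

theorem outerA_fold (A : Int) (B : List Int) (C : List (List Int)) (Dv : Int)
    (adj : PySem.Dict Int (List Int)) (hadj : ∀ x, adj.getD x [] = gAdj C x)
    (hrange : ∀ x y, y ∈ gAdj C x → 1 ≤ y ∧ y ≤ A) :
    ∀ (ks : List Int), (∀ k ∈ ks, 1 ≤ k ∧ k ≤ A) → ∀ (vl : List Int) (c : Int), (vl.length : Int) = A →
    (ks.foldl (fun (st : List Int × Int) k =>
      if PySem.List.pyGetD st.1 (k-1) 0 ≠ 0 then st
      else
        let r := solveBFS adj B (2*A.toNat+1) (PySem.List.pySetD st.1 (k-1) 1) [k] (PySem.List.pyGetD B (k-1) 0)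
        (r.1, if r.2 ≥ Dv then st.2 + 1 else st.2)) (vl, c)).2
    = (aouter pickF (gAdj C) (fun x => PySem.List.pyGetD B (x-1) 0) (2*A.toNat+1) Dv ks (VA A vl) c).2 := by
  intro ks
  induction ks with
  | nil => intro _ vl c _; rfl
  | cons k ks' ih =>
    intro hks vl c hlen
    have hk := hks k (List.mem_cons_self ..)
    have hks' : ∀ x ∈ ks', 1 ≤ x ∧ x ≤ A := fun x hx => hks x (List.mem_cons_of_mem _ hx)
    have hcond : VA A vl k = decide (PySem.List.pyGetD vl (k-1) 0 ≠ 0) := by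
      simp [VA, hk.1, hk.2]
    by_cases hv : PySem.List.pyGetD vl (k-1) 0 ≠ 0
    · have hc : VA A vl k = true := by rw [hcond]; simp [hv]
      simp only [List.foldl_cons, if_pos hv]
      rw [show aouter pickF (gAdj C) (fun x => PySem.List.pyGetD B (x-1) 0) (2*A.toNat+1) Dv (k :: ks') (VA A vl) c
          = aouter pickF (gAdj C) (fun x => PySem.List.pyGetD B (x-1) 0) (2*A.toNat+1) Dv ks' (VA A vl) c by
        simp only [aouter, List.foldl_cons, hc, if_true]]
      exact ih hks' vl c hlen
    · have hc : VA A vl k = false := by rw [hcond]; simp [hv]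
      have hlen' : ((PySem.List.pySetD vl (k-1) 1).length : Int) = A := by
        rw [PySem.List.length_pySetD]; exact hlen
      obtain ⟨b1, b2, b3⟩ := bfsA_bridge A B C adj hadj hrange (2*A.toNat+1)
        (PySem.List.pySetD vl (k-1) 1) [k] (PySem.List.pyGetD B (k-1) 0) hlen'
      rw [VA_set A vl k hk.1 hk.2 hlen] at b2 b3
      set r := solveBFS adj B (2*A.toNat+1) (PySem.List.pySetD vl (k-1) 1) [k] (PySem.List.pyGetD B (k-1) 0) with hrdef
      set rr := arun pickF (gAdj C) (fun x => PySem.List.pyGetD B (x-1) 0) (2*A.toNat+1)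
        ⟨fun y => if y = k then true else VA A vl y, [k], PySem.List.pyGetD B (k-1) 0⟩ with hrrdef
      have hstep : aouter pickF (gAdj C) (fun x => PySem.List.pyGetD B (x-1) 0) (2*A.toNat+1) Dv (k :: ks') (VA A vl) c
          = aouter pickF (gAdj C) (fun x => PySem.List.pyGetD B (x-1) 0) (2*A.toNat+1) Dv ks' rr.V (if rr.s ≥ Dv then c + 1 else c) := by
        simp only [aouter, List.foldl_cons, hc, Bool.false_eq_true, if_false]
        rw [hrrdef]
      rw [hstep]
      simp only [List.foldl_cons, if_neg hv]
      rw [b3]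
      have := ih hks' r.1 (if rr.s ≥ Dv then c + 1 else c) b1
      rw [b2] at this
      exact this

-- ---------- connectivity relation ----------

theorem mem_gAdj_iff (C : List (List Int)) (x y : Int) :
    y ∈ gAdj C x ↔ edgeRel C x y := by
  simp only [gAdj, List.mem_flatMap, edgeRel, List.mem_append]
  constructor
  · rintro ⟨e, he, h | h⟩
    · split_ifs at h with h0
      · simp only [List.mem_singleton] at h
        exact ⟨e, he, Or.inl ⟨h0, h.symm⟩⟩
      · simp at h
    · split_ifs at h with h0
      · simp only [List.mem_singleton] at h
        exact ⟨e, he, Or.inr ⟨h0, h.symm⟩⟩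
      · simp at h
  · rintro ⟨e, he, ⟨h0, h1⟩ | ⟨h0, h1⟩⟩
    · exact ⟨e, he, Or.inl (by simp [h0, h1])⟩
    · exact ⟨e, he, Or.inr (by simp [h0, h1])⟩

theorem edgeRel_symm (C : List (List Int)) : Symmetric (edgeRel C) := by
  rintro x y ⟨e, he, ⟨h0, h1⟩ | ⟨h0, h1⟩⟩
  · exact ⟨e, he, Or.inr ⟨h1, h0⟩⟩
  · exact ⟨e, he, Or.inl ⟨h1, h0⟩⟩

theorem ConnL_symm (C : List (List Int)) {x y : Int} (h : ConnL C x y) : ConnL C y x :=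
  Relation.ReflTransGen.symmetric (edgeRel_symm C) h

theorem ConnL_nil (x y : Int) : ConnL [] x y ↔ x = y := by
  constructor
  · intro h
    induction h with
    | refl => rfl
    | tail _ hedge ih => obtain ⟨e, he, -⟩ := hedge; simp at he
  · rintro rfl; exact Relation.ReflTransGen.refl

theorem edgeRel_snoc (p : List (List Int)) (e : List Int) (x y : Int) :
    edgeRel (p ++ [e]) x y ↔ edgeRel p x y ∨
      (PySem.List.pyGetD e 0 0 = x ∧ PySem.List.pyGetD e 1 0 = y) ∨
      (PySem.List.pyGetD e 1 0 = x ∧ PySem.List.pyGetD e 0 0 = y) := by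
  simp only [edgeRel, List.mem_append, List.mem_singleton]
  constructor
  · rintro ⟨e', he' | rfl, h⟩
    · exact Or.inl ⟨e', he', h⟩
    · exact Or.inr h
  · rintro (⟨e', he', h⟩ | h)
    · exact ⟨e', Or.inl he', h⟩
    · exact ⟨e, Or.inr rfl, h⟩

theorem ConnL_mono (p : List (List Int)) (e : List Int) {x y : Int}
    (h : ConnL p x y) : ConnL (p ++ [e]) x y := by
  refine Relation.ReflTransGen.mono ?_ h
  intro a b hab
  exact (edgeRel_snoc p e a b).mpr (Or.inl hab)

theorem ConnL_snoc (p : List (List Int)) (e : List Int) (x y : Int) :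
    ConnL (p ++ [e]) x y ↔ ConnL p x y ∨
      (ConnL p x (PySem.List.pyGetD e 0 0) ∧ ConnL p (PySem.List.pyGetD e 1 0) y) ∨
      (ConnL p x (PySem.List.pyGetD e 1 0) ∧ ConnL p (PySem.List.pyGetD e 0 0) y) := by
  set u := PySem.List.pyGetD e 0 0
  set v := PySem.List.pyGetD e 1 0
  constructor
  · intro h
    induction h with
    | refl => exact Or.inl Relation.ReflTransGen.refl
    | tail hxb hedge ih =>
      rename_i b c
      rcases (edgeRel_snoc p e b c).mp hedge with hp | ⟨hu, hv⟩ | ⟨hv, hu⟩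
      · rcases ih with h1 | ⟨h1, h2⟩ | ⟨h1, h2⟩
        · exact Or.inl (h1.tail hp)
        · exact Or.inr (Or.inl ⟨h1, h2.tail hp⟩)
        · exact Or.inr (Or.inr ⟨h1, h2.tail hp⟩)
      · subst hu; subst hv
        rcases ih with h1 | ⟨h1, h2⟩ | ⟨h1, h2⟩
        · exact Or.inr (Or.inl ⟨h1, Relation.ReflTransGen.refl⟩)
        · exact Or.inr (Or.inl ⟨h1, Relation.ReflTransGen.refl⟩)
        · exact Or.inl h1
      · subst hu; subst hv
        rcases ih with h1 | ⟨h1, h2⟩ | ⟨h1, h2⟩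
        · exact Or.inr (Or.inr ⟨h1, Relation.ReflTransGen.refl⟩)
        · exact Or.inl h1
        · exact Or.inr (Or.inr ⟨h1, Relation.ReflTransGen.refl⟩)
  · have huv : ConnL (p ++ [e]) u v :=
      Relation.ReflTransGen.single ((edgeRel_snoc p e u v).mpr (Or.inr (Or.inl ⟨rfl, rfl⟩)))
    have hvu : ConnL (p ++ [e]) v u :=
      Relation.ReflTransGen.single ((edgeRel_snoc p e v u).mpr (Or.inr (Or.inr ⟨rfl, rfl⟩)))
    rintro (h | ⟨h1, h2⟩ | ⟨h1, h2⟩)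
    · exact ConnL_mono p e h
    · exact ((ConnL_mono p e h1).trans huv).trans (ConnL_mono p e h2)
    · exact ((ConnL_mono p e h1).trans hvu).trans (ConnL_mono p e h2)

-- ---------- generic dict fold lemmas ----------

theorem foldl_insert_getD {ν : Type} (g : Int → ν) (l : List Int) :
    ∀ (d : PySem.Dict Int ν) (y : Int) (dflt : ν),
    (l.foldl (fun d i => d.insert i (g i)) d).getD y dflt = if y ∈ l then g y else d.getD y dflt := by
  induction l with
  | nil => intro d y dflt; simp
  | cons i t ih =>
    intro d y dflt
    rw [List.foldl_cons, ih]
    by_cases hy : y ∈ t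
    · simp [hy]
    · rw [if_neg hy, PySem.Dict.getD_insert]
      by_cases hyi : y = i <;> simp [hyi, hy]

theorem find?_filter_ne {ν : Type} :
    ∀ (l : List (Int × ν)) (k r : Int),
    List.find? (fun p => p.1 == r) (l.filter (fun p => !(p.1 == k)))
      = if r = k then none else List.find? (fun p => p.1 == r) l := by
  intro l
  induction l with
  | nil => intro k r; by_cases h : r = k <;> simp [h]
  | cons p t ih =>
    intro k r
    by_cases hpk : p.1 = k
    · rw [List.filter_cons, if_neg (by simp [hpk]), ih]
      by_cases hrk : r = k
      · rw [if_pos hrk, if_pos hrk]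
      · rw [if_neg hrk, if_neg hrk]
        have : (p.1 == r) = false := by simp [hpk]; omega
        simp only [List.find?, this]
    · rw [List.filter_cons, if_pos (by simp [hpk])]
      by_cases hpr : p.1 = r
      · have hrk : r ≠ k := fun h => hpk (hpr.trans h)
        have ht : (p.1 == r) = true := by simp [hpr]
        rw [if_neg hrk]
        simp only [List.find?, ht]
      · have hf : (p.1 == r) = false := by simp [hpr]
        simp only [List.find?, hf]
        exact ih k r

theorem get?_erase {ν : Type} (d : PySem.Dict Int ν) (k r : Int) :
    (d.erase k).get? r = if r = k then none else d.get? r := by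
  obtain ⟨items⟩ := d
  simp only [PySem.Dict.erase, PySem.Dict.get?]
  rw [find?_filter_ne]
  by_cases h : r = k <;> simp [h]

theorem getD_erase {ν : Type} (d : PySem.Dict Int ν) (k r : Int) (dflt : ν) :
    (d.erase k).getD r dflt = if r = k then dflt else d.getD r dflt := by
  rw [PySem.Dict.getD_eq_get?_getD, PySem.Dict.getD_eq_get?_getD, get?_erase]
  by_cases h : r = k <;> simp [h]

-- ---------- union-find invariant ----------

theorem ufInit_inv (A : Int) : UFInv A [] (repInit A, memInit A) := by
  have hrep : ∀ x, 1 ≤ x → x ≤ A → (repInit A).getD x 0 = x := by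
    intro x h1 h2
    unfold repInit
    rw [foldl_insert_getD (fun i => i)]
    rw [if_pos (PySem.List.mem_pyRange_one.mpr ⟨h1, by omega⟩)]
  have hmem : ∀ r, (memInit A).getD r [] = if r ∈ PySem.List.pyRange 1 (A+1) then [r] else [] := by
    intro r
    unfold memInit
    rw [foldl_insert_getD (fun i => [i])]
    split_ifs <;> simp
  refine ⟨?_, ?_, ?_⟩
  · intro x h1 h2
    rw [hrep x h1 h2]; exact ⟨h1, h2⟩
  · intro x y h1 h2 h3 h4
    rw [hrep x h1 h2, hrep y h3 h4, ConnL_nil]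
  · intro r x
    rw [hmem r]
    split_ifs with hr
    · rw [PySem.List.mem_pyRange_one] at hr
      simp only [List.mem_singleton]
      constructor
      · rintro rfl
        exact ⟨hr.1, by omega, hrep x hr.1 (by omega)⟩
      · rintro ⟨hx1, hx2, hx3⟩
        rw [hrep x hx1 hx2] at hx3
        exact hx3
    · rw [PySem.List.mem_pyRange_one] at hr
      simp only [List.not_mem_nil, false_iff, not_and]
      intro hx1 hx2 hx3
      rw [hrep x hx1 hx2] at hx3
      subst hx3
      omega

theorem ufStep_inv (A : Int) (p : List (List Int)) (st : PySem.Dict Int Int × PySem.Dict Int (List Int))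
    (e : List Int)
    (hu : 1 ≤ PySem.List.pyGetD e 0 0 ∧ PySem.List.pyGetD e 0 0 ≤ A)
    (hv : 1 ≤ PySem.List.pyGetD e 1 0 ∧ PySem.List.pyGetD e 1 0 ≤ A)
    (hinv : UFInv A p st) : UFInv A (p ++ [e]) (ufStep st e) := by
  obtain ⟨h1, h2, h3⟩ := hinv
  set u := PySem.List.pyGetD e 0 0
  set v := PySem.List.pyGetD e 1 0
  set ru := st.1.getD u 0 with hru
  set rv := st.1.getD v 0 with hrv
  have hrur : 1 ≤ ru ∧ ru ≤ A := h1 u hu.1 hu.2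
  have hxu : ∀ x, 1 ≤ x → x ≤ A → (st.1.getD x 0 = ru ↔ ConnL p x u) := by
    intro x hx1 hx2
    rw [← h2 x u hx1 hx2 hu.1 hu.2]
  have hxv : ∀ x, 1 ≤ x → x ≤ A → (st.1.getD x 0 = rv ↔ ConnL p x v) := by
    intro x hx1 hx2
    rw [← h2 x v hx1 hx2 hv.1 hv.2]
  by_cases hne : ru ≠ rv
  · have hstep : ufStep st e =
        ((st.2.getD rv []).foldl (fun d x => d.insert x ru) st.1,
         (st.2.modify ru [] (fun l => l ++ st.2.getD rv [])).erase rv) := by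
      unfold ufStep
      rw [if_pos hne]
    rw [hstep]
    have hc' : ∀ y, ((st.2.getD rv []).foldl (fun d x => d.insert x ru) st.1).getD y 0
        = if (1 ≤ y ∧ y ≤ A ∧ st.1.getD y 0 = rv) then ru else st.1.getD y 0 := by
      intro y
      rw [show (fun (d : PySem.Dict Int Int) (x : Int) => d.insert x ru)
            = (fun d x => d.insert x ((fun _ => ru) x)) from rfl,
          foldl_insert_getD (fun _ => ru)]
      by_cases hy : y ∈ st.2.getD rv []
      · rw [if_pos hy, if_pos]
        exact (h3 rv y).mp hy
      · rw [if_neg hy, if_neg]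
        intro hcontra
        exact hy ((h3 rv y).mpr hcontra)
    refine ⟨?_, ?_, ?_⟩
    · intro x hx1 hx2
      rw [hc' x]
      split_ifs
      · exact hrur
      · exact h1 x hx1 hx2
    · intro x y hx1 hx2 hy1 hy2
      rw [hc' x, hc' y, ConnL_snoc]
      by_cases hxrv : st.1.getD x 0 = rv <;> by_cases hyrv : st.1.getD y 0 = rv
      · rw [if_pos ⟨hx1, hx2, hxrv⟩, if_pos ⟨hy1, hy2, hyrv⟩]
        have : ConnL p x y := (h2 x y hx1 hx2 hy1 hy2).mp (hxrv.trans hyrv.symm)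
        simp [this]
      · rw [if_pos ⟨hx1, hx2, hxrv⟩, if_neg (by rintro ⟨-, -, h⟩; exact hyrv h)]
        constructor
        · intro h
          refine Or.inr (Or.inr ⟨(hxv x hx1 hx2).mp hxrv, ?_⟩)
          exact ConnL_symm p ((hxu y hy1 hy2).mp h.symm)
        · rintro (h | ⟨ha, hb⟩ | ⟨ha, hb⟩)
          · exact absurd ((h2 x y hx1 hx2 hy1 hy2).mpr h) (fun hh => hyrv (hh ▸ hxrv))
          · exact absurd (((hxu x hx1 hx2).mpr ha).symm.trans hxrv) hne
          · exact ((hxu y hy1 hy2).mpr (ConnL_symm p hb)).symm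
      · rw [if_neg (by rintro ⟨-, -, h⟩; exact hxrv h), if_pos ⟨hy1, hy2, hyrv⟩]
        constructor
        · intro h
          exact Or.inr (Or.inl ⟨(hxu x hx1 hx2).mp h, ConnL_symm p ((hxv y hy1 hy2).mp hyrv)⟩)
        · rintro (h | ⟨ha, hb⟩ | ⟨ha, hb⟩)
          · exact absurd ((h2 x y hx1 hx2 hy1 hy2).mpr h) (fun hh => hxrv (hh.symm ▸ hyrv))
          · exact (hxu x hx1 hx2).mpr ha
          · exact absurd ((hxv x hx1 hx2).mpr ha) hxrv
      · rw [if_neg (by rintro ⟨-, -, h⟩; exact hxrv h), if_neg (by rintro ⟨-, -, h⟩; exact hyrv h)]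
        rw [h2 x y hx1 hx2 hy1 hy2]
        constructor
        · exact Or.inl
        · rintro (h | ⟨ha, hb⟩ | ⟨ha, hb⟩)
          · exact h
          · exact absurd ((hxv y hy1 hy2).mpr (ConnL_symm p hb)) hyrv
          · exact absurd ((hxv x hx1 hx2).mpr ha) hxrv
    · intro r x
      rw [getD_erase]
      by_cases hrrv : r = rv
      · rw [if_pos hrrv]
        simp only [List.not_mem_nil, false_iff]
        rintro ⟨hx1, hx2, hc⟩
        rw [hc' x] at hc
        rw [hrrv] at hc
        split_ifs at hc with hcase
        · exact hne hc
        · exact hcase ⟨hx1, hx2, hc⟩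
      · rw [if_neg hrrv, PySem.Dict.getD_modify]
        by_cases hrru : r = ru
        · subst hrru
          rw [if_pos rfl, List.mem_append]

          constructor
          · rintro (h | h)
            · obtain ⟨hx1, hx2, hx3⟩ := (h3 ru x).mp h
              refine ⟨hx1, hx2, ?_⟩
              rw [hc' x, if_neg (by rintro ⟨-, -, hc⟩; rw [hx3] at hc; exact hne hc)]
              exact hx3
            · obtain ⟨hx1, hx2, hx3⟩ := (h3 rv x).mp h
              refine ⟨hx1, hx2, ?_⟩
              rw [hc' x, if_pos ⟨hx1, hx2, hx3⟩]
          · rintro ⟨hx1, hx2, hx3⟩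
            rw [hc' x] at hx3
            split_ifs at hx3 with hcase
            · exact Or.inr ((h3 rv x).mpr ⟨hx1, hx2, hcase.2.2⟩)
            · exact Or.inl ((h3 _ x).mpr ⟨hx1, hx2, hx3⟩)
        · rw [if_neg hrru, h3 r x]
          constructor
          · rintro ⟨hx1, hx2, hx3⟩
            refine ⟨hx1, hx2, ?_⟩
            rw [hc' x, if_neg (by rintro ⟨-, -, hc⟩; exact hrrv (hx3 ▸ hc ▸ rfl))]
            exact hx3
          · rintro ⟨hx1, hx2, hx3⟩
            rw [hc' x] at hx3
            split_ifs at hx3 with hcase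
            · exact absurd hx3.symm hrru
            · exact ⟨hx1, hx2, hx3⟩
  · push_neg at hne
    have hstep : ufStep st e = st := by
      unfold ufStep
      rw [if_neg (by simpa using hne)]
    rw [hstep]
    have huv : ConnL p u v := (h2 u v hu.1 hu.2 hv.1 hv.2).mp hne
    refine ⟨h1, ?_, h3⟩
    intro x y hx1 hx2 hy1 hy2
    rw [h2 x y hx1 hx2 hy1 hy2, ConnL_snoc]
    constructor
    · exact Or.inl
    · rintro (h | ⟨ha, hb⟩ | ⟨ha, hb⟩)
      · exact h
      · exact (ha.trans huv).trans hb
      · exact (ha.trans (ConnL_symm p huv)).trans hb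

theorem ufFold_inv (A : Int) :
    ∀ (es : List (List Int)) (p : List (List Int)) (st : PySem.Dict Int Int × PySem.Dict Int (List Int)),
    (∀ e ∈ es, (1 ≤ PySem.List.pyGetD e 0 0 ∧ PySem.List.pyGetD e 0 0 ≤ A) ∧
               (1 ≤ PySem.List.pyGetD e 1 0 ∧ PySem.List.pyGetD e 1 0 ≤ A)) →
    UFInv A p st → UFInv A (p ++ es) (es.foldl ufStep st) := by
  intro es
  induction es with
  | nil => intro p st _ h; simpa using h
  | cons e t ih =>
    intro p st hes h
    have he := hes e (List.mem_cons_self ..)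
    have ht : ∀ e' ∈ t, _ := fun e' he' => hes e' (List.mem_cons_of_mem _ he')
    have := ih (p ++ [e]) (ufStep st e) ht (ufStep_inv A p st e he.1 he.2 h)
    rw [List.foldl_cons]
    simpa [List.append_assoc] using this

-- ---------- BFS closure = class of the representative map ----------

theorem RC_class (C : List (List Int)) (A : Int) (c : Int → Int) (seen : List Int)
    (V : Int → Bool) (k : Int)
    (hcc : ∀ x y, 1 ≤ x → x ≤ A → 1 ≤ y → y ≤ A → (c x = c y ↔ ConnL C x y))
    (hgN : ∀ x y, y ∈ gAdj C x → (1 ≤ x ∧ x ≤ A) ∧ (1 ≤ y ∧ y ≤ A))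
    (hV : ∀ x, V x = true ↔ (1 ≤ x ∧ x ≤ A) ∧ c x ∈ seen)
    (hk1 : 1 ≤ k) (hk2 : k ≤ A) (hks : c k ∉ seen) :
    ∀ x, ((if x = k then true else V x) = true ∨ RC (gAdj C) (fun y => if y = k then true else V y) [k] x)
      ↔ (V x = true ∨ ((1 ≤ x ∧ x ≤ A) ∧ c x = c k)) := by
  have hVfalse : ∀ x, 1 ≤ x → x ≤ A → c x = c k → V x = false := by
    intro x hx1 hx2 hc
    cases hvx : V x with
    | false => rfl
    | true =>
      obtain ⟨-, hmem⟩ := (hV x).mp hvx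
      exact absurd (hc ▸ hmem) hks
  intro x
  constructor
  · rintro (h | h)
    · by_cases hxk : x = k
      · subst hxk; exact Or.inr ⟨⟨hk1, hk2⟩, rfl⟩
      · rw [if_neg hxk] at h; exact Or.inl h
    · induction h with
      | base z hz =>
        simp only [List.mem_singleton] at hz
        subst hz
        exact Or.inr ⟨⟨hk1, hk2⟩, rfl⟩
      | step z y hrz hyg hVy ih =>
        have hzy : (1 ≤ z ∧ z ≤ A) ∧ (1 ≤ y ∧ y ≤ A) := hgN z y hyg
        have hVyf : V y = false := by
          by_cases hyk : y = k
          · simp [hyk] at hVy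
          · simpa [hyk] using hVy
        rcases ih with hVz | ⟨hzr, hcz⟩
        · -- V z true means the whole class of z is seen, so y would be seen too
          obtain ⟨hzrange, hzseen⟩ := (hV z).mp hVz
          have hcy : c z = c y := (hcc z y hzrange.1 hzrange.2 hzy.2.1 hzy.2.2).mpr
            (Relation.ReflTransGen.single ((mem_gAdj_iff C z y).mp hyg))
          have : V y = true := (hV y).mpr ⟨hzy.2, hcy ▸ hzseen⟩
          rw [this] at hVyf; cases hVyf
        · have hcy : c z = c y := (hcc z y hzr.1 hzr.2 hzy.2.1 hzy.2.2).mpr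
            (Relation.ReflTransGen.single ((mem_gAdj_iff C z y).mp hyg))
          exact Or.inr ⟨hzy.2, hcy ▸ hcz⟩
  · rintro (h | ⟨⟨hx1, hx2⟩, hc⟩)
    · left
      by_cases hxk : x = k <;> simp [hxk, h]
    · by_cases hxk : x = k
      · left; rw [if_pos hxk]
      · right
        have hconn : ConnL C k x := (hcc k x hk1 hk2 hx1 hx2).mp hc.symm
        have key : ∀ w, ConnL C k w → 1 ≤ w → w ≤ A → w ≠ k →
            RC (gAdj C) (fun y => if y = k then true else V y) [k] w := by
          intro w hw
          induction hw with
          | refl => intro _ _ hcontra; exact absurd rfl hcontra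
          | @tail z w' hkz hzw' ih2 =>
            intro hw1 hw2 hwk
            have hz := hgN z w' ((mem_gAdj_iff C z w').mpr hzw')
            have hcw : c w' = c k := by
              have : ConnL C k w' := Relation.ReflTransGen.tail hkz hzw'
              exact ((hcc k w' hk1 hk2 hw1 hw2).mpr this).symm
            have hVw : V w' = false := hVfalse w' hw1 hw2 hcw
            have hV1w : (if w' = k then true else V w') = false := by simp [hwk, hVw]
            by_cases hzk : z = k
            · subst hzk
              exact RC.step _ w' (RC.base _ (List.mem_singleton.mpr rfl))
                ((mem_gAdj_iff C _ w').mpr hzw') hV1w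
            · have hrz := ih2 hz.1.1 hz.1.2 hzk
              exact RC.step z w' hrz ((mem_gAdj_iff C z w').mpr hzw') hV1w
        exact key x hconn hx1 hx2 hxk

-- ---------- sum bookkeeping ----------

theorem sum_map_ite_filter (l : List Int) (p : Int → Bool) (f : Int → Int) :
    (l.map (fun x => if p x then f x else 0)).sum = ((l.filter p).map f).sum := by
  induction l with
  | nil => rfl
  | cons a t ih =>
    rw [List.map_cons, List.sum_cons, List.filter_cons]
    by_cases h : p a
    · rw [if_pos h, if_pos h, List.map_cons, List.sum_cons, ih]
    · rw [if_neg h, if_neg (by simpa using h), ih, zero_add]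

theorem filter_split_head (l : List Int) (p : Int → Bool) (f : Int → Int) (k : Int)
    (hk : k ∈ l) (hnd : l.Nodup) (hpk : p k = true) :
    ((l.filter p).map f).sum = f k + ((l.filter (fun x => p x && !(x == k))).map f).sum := by
  induction l with
  | nil => simp at hk
  | cons a t ih =>
    rcases List.nodup_cons.mp hnd with ⟨hna, hnt⟩
    rcases List.mem_cons.mp hk with rfl | hk'
    · have hfil : t.filter (fun x => p x && !(x == k)) = t.filter p := by
        apply List.filter_congr
        intro x hx
        have : x ≠ k := fun he => hna (he ▸ hx)
        simp [this]
      rw [List.filter_cons, if_pos (by simp [hpk]), List.filter_cons,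
        if_neg (by simp [hpk]), hfil, List.map_cons, List.sum_cons]
    · have hak : a ≠ k := fun he => hna (he ▸ hk')
      rw [List.filter_cons, List.filter_cons]
      by_cases hpa : p a
      · rw [if_pos (by simp [hpa]), if_pos (by simp [hpa, hak]), List.map_cons, List.sum_cons,
          List.map_cons, List.sum_cons, ih hk' hnt]
        ring
      · rw [if_neg (by simpa using hpa), if_neg (by simp [hpa]), ih hk' hnt]

-- ---------- the abstract outer loop counts first-seen classes ----------

theorem outerA_abstract (A : Int) (C : List (List Int)) (b c : Int → Int) (Dv : Int) (fuel : Nat)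
    (hfuel : 1 + 2 * (PySem.List.pyRange 1 (A+1) 1).length ≤ fuel)
    (hcc : ∀ x y, 1 ≤ x → x ≤ A → 1 ≤ y → y ≤ A → (c x = c y ↔ ConnL C x y))
    (hgN : ∀ x y, y ∈ gAdj C x → (1 ≤ x ∧ x ≤ A) ∧ (1 ≤ y ∧ y ≤ A)) :
    ∀ (ks seen : List Int) (V : Int → Bool) (cnt : Int),
    (∀ k ∈ ks, 1 ≤ k ∧ k ≤ A) →
    (∀ x, V x = true ↔ (1 ≤ x ∧ x ≤ A) ∧ c x ∈ seen) →
    (aouter pickF (gAdj C) b fuel Dv ks V cnt).2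
      = cnt + (((firstsV c seen ks).countP
          (fun k => decide (Dv ≤ clsSum c b (PySem.List.pyRange 1 (A+1) 1) k)) : Nat) : Int) := by
  intro ks
  induction ks with
  | nil =>
    intro seen V cnt _ _
    simp [aouter, firstsV]
  | cons k ks' ih =>
    intro seen V cnt hks hV
    have hk := hks k (List.mem_cons_self ..)
    have hks' : ∀ x ∈ ks', 1 ≤ x ∧ x ≤ A := fun x hx => hks x (List.mem_cons_of_mem _ hx)
    by_cases hseen : c k ∈ seen
    · have hVk : V k = true := (hV k).mpr ⟨hk, hseen⟩
      have hstep : aouter pickF (gAdj C) b fuel Dv (k :: ks') V cnt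
          = aouter pickF (gAdj C) b fuel Dv ks' V cnt := by
        simp only [aouter, List.foldl_cons, hVk, if_true]
      rw [hstep, firstsV, if_pos hseen]
      exact ih seen V cnt hks' hV
    · have hVk : V k = false := by
        cases h : V k with
        | false => rfl
        | true => exact absurd ((hV k).mp h).2 hseen
      set V1 : Int → Bool := fun y => if y = k then true else V y with hV1def
      have hkN : k ∈ PySem.List.pyRange 1 (A+1) 1 :=
        PySem.List.mem_pyRange_one.mpr ⟨hk.1, by omega⟩
      have hgnodes : ∀ x y, y ∈ gAdj C x → y ∈ PySem.List.pyRange 1 (A+1) 1 := by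
        intro x y hy
        exact PySem.List.mem_pyRange_one.mpr ⟨(hgN x y hy).2.1, by have := (hgN x y hy).2.2; omega⟩
      have hA1 : ∀ p ∈ ([k] : List Int), V1 p = true := by
        intro p hp
        simp only [List.mem_singleton] at hp
        simp [hV1def, hp]
      have hA2 : ∀ p ∈ ([k] : List Int), p ∈ PySem.List.pyRange 1 (A+1) 1 := by
        intro p hp
        simp only [List.mem_singleton] at hp
        subst hp; exact hkN
      have hA3 : CL (gAdj C) V1 [k] := by
        intro x hx
        by_cases hxk : x = k
        · exact Or.inl (by simp [hxk])
        · right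
          intro y hy
          have hVx : V x = true := by simpa [hV1def, hxk] using hx
          obtain ⟨hxr, hxs⟩ := (hV x).mp hVx
          have hyr := (hgN x y hy).2
          have hcxy : c x = c y := (hcc x y hxr.1 hxr.2 hyr.1 hyr.2).mpr
            (Relation.ReflTransGen.single ((mem_gAdj_iff C x y).mp hy))
          have : V y = true := (hV y).mpr ⟨hyr, hcxy ▸ hxs⟩
          simp [hV1def, this]
      have hA4 : ([k] : List Int).length + 2 * unvis (PySem.List.pyRange 1 (A+1) 1) V1
          ≤ fuel := by
        have := List.length_filter_le (fun x => !V1 x) (PySem.List.pyRange 1 (A+1) 1)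
        simp only [unvis, List.length_singleton]
        omega
      obtain ⟨e1, e2, e3, e4, e5⟩ := arun_char (PySem.List.pyRange 1 (A+1) 1)
        (PySem.List.nodup_pyRange_one _ _) (gAdj C) b hgnodes pickF pickF_ok fuel
        ⟨V1, [k], b k⟩ hA1 hA2 hA3 hA4
      set r := arun pickF (gAdj C) b fuel ⟨V1, [k], b k⟩ with hrdef
      have hclass := RC_class C A c seen V k hcc hgN hV hk.1 hk.2 hseen
      have hrV : ∀ x, r.V x = true ↔ (V x = true ∨ ((1 ≤ x ∧ x ≤ A) ∧ c x = c k)) := by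
        intro x
        rw [e3 x]
        exact hclass x
      -- the sum collected is the class sum of k
      have hrs : r.s = clsSum c b (PySem.List.pyRange 1 (A+1) 1) k := by
        have hsum : sumNew (PySem.List.pyRange 1 (A+1) 1) b V1 r.V
            = (((PySem.List.pyRange 1 (A+1) 1).filter
                (fun x => (c x == c k) && !(x == k))).map b).sum := by
          rw [sumNew, ← sum_map_ite_filter]
          apply congrArg
          apply List.map_congr_left
          intro x hx
          rw [PySem.List.mem_pyRange_one] at hx
          have hx1 : 1 ≤ x := hx.1
          have hx2 : x ≤ A := by omega
          by_cases hxk : x = k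
          · simp [hV1def, hxk]
          · have hVV1 : V1 x = V x := by simp [hV1def, hxk]
            by_cases hcx : c x = c k
            · have hVx : V x = false := by
                cases h : V x with
                | false => rfl
                | true => exact absurd (hcx ▸ ((hV x).mp h).2) hseen
              have hrx : r.V x = true := (hrV x).mpr (Or.inr ⟨⟨hx1, hx2⟩, hcx⟩)
              simp [hrx, hVV1, hVx, hcx, hxk]
            · have hrx : r.V x = V x := by
                cases h : r.V x with
                | true =>
                  rcases (hrV x).mp h with hvx | ⟨-, hc⟩
                  · exact hvx.symm
                  · exact absurd hc hcx
                | false =>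
                  cases hv : V x with
                  | false => rfl
                  | true => rw [(hrV x).mpr (Or.inl hv)] at h; cases h
              simp [hrx, hVV1, hcx]
        rw [e4, hsum]
        simp only
        rw [clsSum, filter_split_head (PySem.List.pyRange 1 (A+1) 1)
          (fun x => c x == c k) b k hkN (PySem.List.nodup_pyRange_one _ _) (by simp)]
      have hstep : aouter pickF (gAdj C) b fuel Dv (k :: ks') V cnt
          = aouter pickF (gAdj C) b fuel Dv ks' r.V (if r.s ≥ Dv then cnt + 1 else cnt) := by
        simp only [aouter, List.foldl_cons, hVk, Bool.false_eq_true, if_false]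
        rfl
      have hV' : ∀ x, r.V x = true ↔ (1 ≤ x ∧ x ≤ A) ∧ c x ∈ seen ++ [c k] := by
        intro x
        rw [hrV x, hV x]
        constructor
        · rintro (⟨hr, hs⟩ | ⟨hr, hc⟩)
          · exact ⟨hr, List.mem_append.mpr (Or.inl hs)⟩
          · exact ⟨hr, List.mem_append.mpr (Or.inr (by simp [hc]))⟩
        · rintro ⟨hr, hs⟩
          rcases List.mem_append.mp hs with h | h
          · exact Or.inl ⟨hr, h⟩
          · simp only [List.mem_singleton] at h
            exact Or.inr ⟨hr, h⟩
      rw [hstep, ih (seen ++ [c k]) r.V _ hks' hV']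
      rw [firstsV, if_neg hseen, List.countP_cons]
      rw [hrs]
      by_cases hD : Dv ≤ clsSum c b (PySem.List.pyRange 1 (A+1) 1) k
      · rw [if_pos (by exact hD), if_pos (by simpa using hD)]
        push_cast
        ring
      · rw [if_neg (by exact hD), if_neg (by simpa using hD)]
        push_cast
        ring

-- ---------- the grouping dict ----------

theorem grp_getD (c b : Int → Int) (L : List Int) :
    ∀ (s : PySem.Dict Int Int) (r : Int),
    (L.foldl (fun s x => s.insert (c x) (s.getD (c x) 0 + b x)) s).getD r 0
      = s.getD r 0 + ((L.filter (fun x => c x == r)).map b).sum := by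
  induction L with
  | nil => intro s r; simp
  | cons a t ih =>
    intro s r
    rw [List.foldl_cons, ih, List.filter_cons]
    by_cases h : c a = r
    · rw [if_pos (by simp [h]), PySem.Dict.getD_insert, if_pos h.symm, List.map_cons, List.sum_cons, h]
      ring
    · rw [if_neg (by simp [h]), PySem.Dict.getD_insert, if_neg (fun hh => h hh.symm)]

theorem update_firstsV (c : Int → Int) (L : List Int) :
    ∀ (seen : List Int),
    PySem.Set.update seen (L.map c) = seen ++ (firstsV c seen L).map c := by
  induction L with
  | nil => intro seen; simp [firstsV, PySem.Set.update]
  | cons k t ih =>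
    intro seen
    rw [List.map_cons, PySem.Set.update_cons, PySem.Set.add_eq_ite]
    by_cases h : c k ∈ seen
    · rw [if_pos h, firstsV, if_pos h, ih]
    · rw [if_neg h, firstsV, if_neg h, ih (seen ++ [c k])]
      simp

-- ---------- assembling B ----------

theorem solve_alt_eq (A : Int) (B : List Int) (C : List (List Int)) (D : Int) (c : Int → Int)
    (hc : ∀ x, c x = (C.foldl ufStep (repInit A, memInit A)).1.getD x 0) :
    solve_alt A B C D
      = (((firstsV c [] (PySem.List.pyRange 1 (A+1) 1)).countP
          (fun k => decide (D ≤ clsSum c (fun x => PySem.List.pyGetD B (x-1) 0)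
            (PySem.List.pyRange 1 (A+1) 1) k)) : Nat) : Int) := by
  have hceq : (fun x => (C.foldl ufStep (repInit A, memInit A)).1.getD x 0) = c := by
    funext x; exact (hc x).symm
  have hsums : grpSums (C.foldl ufStep (repInit A, memInit A)).1 A B
      = (PySem.List.pyRange 1 (A+1) 1).foldl
          (fun s x => s.insert (c x) (s.getD (c x) 0 + PySem.List.pyGetD B (x-1) 0))
          PySem.Dict.empty := by
    unfold grpSums
    rw [show (fun (s : PySem.Dict Int Int) (x : Int) =>
          s.insert ((C.foldl ufStep (repInit A, memInit A)).1.getD x 0)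
            (s.getD ((C.foldl ufStep (repInit A, memInit A)).1.getD x 0) 0 + PySem.List.pyGetD B (x-1) 0))
        = (fun s x => s.insert (c x) (s.getD (c x) 0 + PySem.List.pyGetD B (x-1) 0)) by
      rw [← hceq]]
  set N := PySem.List.pyRange 1 (A+1) 1 with hN
  set sums := N.foldl (fun s x => s.insert (c x) (s.getD (c x) 0 + PySem.List.pyGetD B (x-1) 0))
    (PySem.Dict.empty : PySem.Dict Int Int) with hsumsdef
  have hkeysnodup : sums.keys.Nodup := by
    rw [hsumsdef]
    exact PySem.Dict.nodup_keys_foldl_insert_key N c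
      (fun s x => s.getD (c x) 0 + PySem.List.pyGetD B (x-1) 0) PySem.Dict.empty
      (by rw [PySem.Dict.keys_empty]; exact List.nodup_nil)
  have hkeys : sums.keys = (firstsV c [] N).map c := by
    rw [hsumsdef]
    rw [PySem.Dict.keys_foldl_insert_key N c
      (fun s x => s.getD (c x) 0 + PySem.List.pyGetD B (x-1) 0) PySem.Dict.empty]
    rw [PySem.Dict.keys_empty]
    exact update_firstsV c N []
  have hvals : sums.values = (firstsV c [] N).map
      (fun k => clsSum c (fun x => PySem.List.pyGetD B (x-1) 0) N k) := by
    rw [PySem.Dict.values_eq_map_keys sums hkeysnodup 0, hkeys, List.map_map]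
    apply List.map_congr_left
    intro k _
    simp only [Function.comp]
    rw [hsumsdef, grp_getD, PySem.Dict.getD_empty, clsSum]
    ring
  have hcount : solve_alt A B C D
      = (grpSums (C.foldl ufStep (repInit A, memInit A)).1 A B).values.foldl
          (fun cnt s => if s ≥ D then cnt + 1 else cnt) 0 := rfl
  rw [hcount, hsums, hvals]
  rw [show (fun (cnt s : Int) => if s ≥ D then cnt + 1 else cnt)
      = (fun cnt s => if (fun t => decide (D ≤ t)) s = true then cnt + 1 else cnt) by
    funext cnt s
    by_cases h : D ≤ s <;> simp [h, ge_iff_le]]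
  rw [PySem.List.foldl_count_if]
  rw [List.countP_map]
  simp only [Function.comp_def, zero_add]

-- ===== VERDICT (by name: the statement is the Claim_ definition above) =====
theorem solve_spec : Claim_equal_solve := by
  intro A B C D hdom hpre
  unfold Spec_solve
  set c : Int → Int := fun x => (C.foldl ufStep (repInit A, memInit A)).1.getD x 0 with hcdef
  have hedges : ∀ e ∈ C, (1 ≤ PySem.List.pyGetD e 0 0 ∧ PySem.List.pyGetD e 0 0 ≤ A) ∧
      (1 ≤ PySem.List.pyGetD e 1 0 ∧ PySem.List.pyGetD e 1 0 ≤ A) := by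
    intro e he
    obtain ⟨-, h1, h2, h3, h4⟩ := hpre.2 e he
    exact ⟨⟨h1, h2⟩, ⟨h3, h4⟩⟩
  have hinv : UFInv A C (C.foldl ufStep (repInit A, memInit A)) := by
    have := ufFold_inv A C [] (repInit A, memInit A) hedges (ufInit_inv A)
    simpa using this
  have hcc : ∀ x y, 1 ≤ x → x ≤ A → 1 ≤ y → y ≤ A → (c x = c y ↔ ConnL C x y) := by
    intro x y hx1 hx2 hy1 hy2
    exact hinv.2.1 x y hx1 hx2 hy1 hy2
  have hrangeA := fun x y hy => mem_gAdj_range A B C D hpre x y hy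
  have hgN : ∀ x y, y ∈ gAdj C x → (1 ≤ x ∧ x ≤ A) ∧ (1 ≤ y ∧ y ≤ A) := by
    intro x y hy
    refine ⟨?_, hrangeA x y hy⟩
    have hx : x ∈ gAdj C y := by
      rw [mem_gAdj_iff] at hy ⊢
      exact edgeRel_symm C hy
    exact hrangeA y x hx
  have hadjA : ∀ x, ((C.foldl (fun d e =>
      (d.modify (PySem.List.pyGetD e 0 0) [] (fun l => l ++ [PySem.List.pyGetD e 1 0])).modify
        (PySem.List.pyGetD e 1 0) [] (fun l => l ++ [PySem.List.pyGetD e 0 0]))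
      ((PySem.List.pyRange 1 (A+1) 1).foldl (fun d i => d.insert i []) PySem.Dict.empty)).getD x []) = gAdj C x := by
    intro x
    rw [adjA_getD, adj0_getD]
    rfl
  have hsolve : solve A B C D
      = ((PySem.List.pyRange 1 (A+1) 1).foldl (fun (st : List Int × Int) k =>
          if PySem.List.pyGetD st.1 (k-1) 0 ≠ 0 then st
          else
            let r := solveBFS (C.foldl (fun d e =>
                (d.modify (PySem.List.pyGetD e 0 0) [] (fun l => l ++ [PySem.List.pyGetD e 1 0])).modify
                  (PySem.List.pyGetD e 1 0) [] (fun l => l ++ [PySem.List.pyGetD e 0 0]))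
                ((PySem.List.pyRange 1 (A+1) 1).foldl (fun d i => d.insert i []) PySem.Dict.empty))
              B (2*A.toNat+1) (PySem.List.pySetD st.1 (k-1) 1) [k] (PySem.List.pyGetD B (k-1) 0)
            (r.1, if r.2 ≥ D then st.2 + 1 else st.2)) (((PySem.List.pyRange 0 A 1).map (fun _ => 0)), 0)).2 := rfl
  by_cases hA : 0 ≤ A
  · have hks : ∀ k ∈ PySem.List.pyRange 1 (A+1) 1, 1 ≤ k ∧ k ≤ A := by
      intro k hk
      rw [PySem.List.mem_pyRange_one] at hk
      omega
    have hlen0 : (((PySem.List.pyRange 0 A 1).map (fun _ => (0:Int))).length : Int) = A := by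
      rw [List.length_map, PySem.List.length_pyRange_one]
      omega
    rw [hsolve, outerA_fold A B C D _ hadjA hrangeA _ hks _ 0 hlen0, VA_zero]
    rw [outerA_abstract A C (fun x => PySem.List.pyGetD B (x-1) 0) c D (2*A.toNat+1)
      (by rw [PySem.List.length_pyRange_one]; omega) hcc hgN
      (PySem.List.pyRange 1 (A+1) 1) [] (fun _ => false) 0 hks
      (by intro x; simp)]
    rw [solve_alt_eq A B C D c (fun x => rfl)]
    ring
  · have hnil : PySem.List.pyRange 1 (A+1) 1 = [] := PySem.List.pyRange_one_eq_nil (by omega)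
    have halt : solve_alt A B C D = 0 := by
      unfold solve_alt grpSums
      rw [hnil]
      rfl
    rw [hsolve, hnil, halt]
    rfl
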